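-- pv_equiv track=rewrite | github.com/artyzhang/Stop-Files-to-Excel | Stop Files to Excel Conversion Folder.py | customranges
-- ===== SOURCE A (Python) =====
-- def customranges(listoflengths): # Create a list of tuples from a list of lengths to serve as ranges
--     tuplelist = []
--     x = 0
--     for n in listoflengths:
--         w = x
--         x += n
--         tuplelist.append((w,x))
--     return tuplelist
-- ===== SOURCE B (Python) =====
-- from itertools import accumulate
--
-- def customranges(listoflengths):
--     prefix = list(accumulate(listoflengths, initial=0))
--     return list(zip(prefix, prefix[1:]))
-- ===== Notes on version B (the rewrite author's own statement) =====
-- stated objective: idiomatic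
-- what changed: Replaced the running-sum loop that appends (w,x) pairs with a two-stage pipeline: build the full prefix-sum table via itertools.accumulate(initial=0), then zip adjacent prefix entries.
import Mathlib
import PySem

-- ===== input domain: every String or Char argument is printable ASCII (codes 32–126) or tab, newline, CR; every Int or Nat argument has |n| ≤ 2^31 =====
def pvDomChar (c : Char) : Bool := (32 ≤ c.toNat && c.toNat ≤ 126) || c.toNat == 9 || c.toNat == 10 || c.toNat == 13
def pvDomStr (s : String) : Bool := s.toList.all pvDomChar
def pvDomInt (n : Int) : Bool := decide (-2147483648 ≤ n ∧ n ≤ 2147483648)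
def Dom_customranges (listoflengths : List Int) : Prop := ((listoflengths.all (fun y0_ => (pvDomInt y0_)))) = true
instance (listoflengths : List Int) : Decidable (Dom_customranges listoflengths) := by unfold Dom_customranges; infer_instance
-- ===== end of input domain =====

-- B builds the prefix-sum table and zips adjacent entries instead of A's running-sum append loop (idiomatic).

-- ===== PORT A =====
def customranges (listoflengths : List Int) : List (Int × Int) :=
  (listoflengths.foldl
    (fun (st : List (Int × Int) × Int) n =>
      let w := st.2
      let x := st.2 + n
      (st.1 ++ [(w, x)], x))
    ([], 0)).1

-- ===== PORT B =====
def customranges_alt (listoflengths : List Int) : List (Int × Int) :=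
  let pfx := List.scanl (· + ·) 0 listoflengths   -- accumulate(listoflengths, initial=0)
  pfx.zip pfx.tail                                 -- zip(prefix, prefix[1:])

-- ===== PRECONDITION & SPEC =====
def Spec_customranges (listoflengths : List Int) (out : List (Int × Int)) : Prop := out = customranges_alt listoflengths
instance (listoflengths : List Int) (out : List (Int × Int)) : Decidable (Spec_customranges listoflengths out) := by unfold Spec_customranges; infer_instance

-- ===== CLAIM (what is proved, stated in full; the proofs are below) =====
def Claim_equal_customranges : Prop := ∀ (listoflengths : List Int), Dom_customranges listoflengths → Spec_customranges listoflengths (customranges listoflengths)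

-- ===== LEMMAS AND PROOFS =====
theorem customranges_foldl_eq (l : List Int) :
    ∀ (acc : List (Int × Int)) (x : Int),
      (l.foldl
        (fun (st : List (Int × Int) × Int) n => (st.1 ++ [(st.2, st.2 + n)], st.2 + n))
        (acc, x)).1
      = acc ++ (List.scanl (· + ·) x l).zip (List.scanl (· + ·) x l).tail := by
  induction l with
  | nil => intro acc x; simp
  | cons n t ih =>
    intro acc x
    have ht : (List.scanl (· + ·) (x + n) t) = (x + n) :: (List.scanl (· + ·) (x + n) t).tail := by
      cases t <;> simp [List.scanl_cons]
    simp only [List.foldl_cons, ih, List.scanl_cons]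
    conv_rhs => rw [ht]
    simp [List.zip]
    rw [← ht]

-- ===== VERDICT (by name: the statement is the Claim_ definition above) =====
theorem customranges_spec : Claim_equal_customranges := by
  intro l _
  show customranges l = customranges_alt l
  simpa [customranges, customranges_alt] using customranges_foldl_eq l [] 0
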